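-- pv_equiv track=rewrite | github.com/Subhankar-Manna/Autonomous-Rag-Agent | app/agents/reviewer.py | contains_hallucination
-- ===== SOURCE A (Python) =====
-- def contains_hallucination(text: str) -> bool:
--     forbidden_phrases = [
--         "generally",
--         "typically",
--         "it appears",
--         "it seems",
--         "based on knowledge",
--         "in general"
--     ]
--     return any(p in text.lower() for p in forbidden_phrases)
-- ===== SOURCE B (Python) =====
-- def contains_hallucination(text: str) -> bool:
--     phrases = ("generally", "typically", "it appears", "it seems",
--                "based on knowledge", "in general")
--     t = text.lower()
--     for i in range(len(t) + 1):
--         for p in phrases: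
--             if t.startswith(p, i):
--                 return True
--     return False
-- ===== Notes on version B (the rewrite author's own statement) =====
-- stated objective: alternative
-- what changed: B makes a single left-to-right scan over the lowercased text, testing at each position whether any forbidden phrase starts there, instead of A's six independent full substring searches.
import Mathlib
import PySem

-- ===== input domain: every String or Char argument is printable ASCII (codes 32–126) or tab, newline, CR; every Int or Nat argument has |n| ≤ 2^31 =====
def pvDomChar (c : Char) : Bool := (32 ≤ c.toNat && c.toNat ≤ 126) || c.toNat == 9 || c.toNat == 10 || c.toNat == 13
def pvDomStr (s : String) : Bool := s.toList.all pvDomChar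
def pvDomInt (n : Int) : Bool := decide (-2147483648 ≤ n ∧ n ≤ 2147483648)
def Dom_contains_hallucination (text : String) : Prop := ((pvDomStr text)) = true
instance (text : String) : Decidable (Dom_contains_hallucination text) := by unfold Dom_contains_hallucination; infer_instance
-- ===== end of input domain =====

-- B changes the traversal: one left-to-right scan testing all phrases at each position,
-- instead of A's six independent substring searches (objective: alternative, same cost).

-- ===== PORT A =====
def contains_hallucination (text : String) : Bool :=
  ["generally", "typically", "it appears", "it seems", "based on knowledge", "in general"].any
    (fun p => PySem.Str.isIn p (PySem.Str.lower text))

-- ===== PORT B =====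
def chPhrases : List (List Char) :=
  ["generally".toList, "typically".toList, "it appears".toList, "it seems".toList,
   "based on knowledge".toList, "in general".toList]

-- the scan over positions i = 0 .. len(t) of Source B, as recursion over suffixes
def chScan (s : List Char) : Bool :=
  if chPhrases.any (fun p => PySem.Chars.startswith s p) then true
  else
    match s with
    | [] => false
    | _ :: rest => chScan rest

def contains_hallucination_alt (text : String) : Bool :=
  chScan (PySem.Str.lower text).toList

-- ===== PRECONDITION & SPEC =====
def Spec_contains_hallucination (text : String) (out : Bool) : Prop := out = contains_hallucination_alt text
instance (text : String) (out : Bool) : Decidable (Spec_contains_hallucination text out) := by unfold Spec_contains_hallucination; infer_instance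

-- ===== CLAIM (what is proved, stated in full; the proofs are below) =====
def Claim_equal_contains_hallucination : Prop := ∀ (text : String), Dom_contains_hallucination text → Spec_contains_hallucination text (contains_hallucination text)

-- ===== LEMMAS AND PROOFS =====

theorem chScan_iff (s : List Char) : chScan s = true ↔ ∃ p ∈ chPhrases, p <:+: s := by
  induction s with
  | nil =>
    rw [chScan]
    constructor
    · intro h; exact absurd h (by decide)
    · rintro ⟨p, hp, hinf⟩
      have : p = [] := List.eq_nil_of_infix_nil hinf
      rw [this] at hp
      exact absurd hp (by decide)
  | cons c rest ih =>
    rw [chScan]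
    by_cases h : chPhrases.any (fun p => PySem.Chars.startswith (c :: rest) p) = true
    · rw [if_pos h]
      simp only [true_iff]
      rw [List.any_eq_true] at h
      obtain ⟨p, hp, hpre⟩ := h
      exact ⟨p, hp, ((PySem.Chars.startswith_iff _ _).mp hpre).isInfix⟩
    · rw [if_neg h, ih]
      constructor
      · rintro ⟨p, hp, hinf⟩; exact ⟨p, hp, hinf.trans (List.suffix_cons c rest).isInfix⟩
      · rintro ⟨p, hp, hinf⟩
        rcases List.infix_cons_iff.mp hinf with hpre | hinf'
        · exact absurd (List.any_eq_true.mpr ⟨p, hp, (PySem.Chars.startswith_iff _ _).mpr hpre⟩) h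
        · exact ⟨p, hp, hinf'⟩

-- ===== VERDICT (by name: the statement is the Claim_ definition above) =====
theorem contains_hallucination_spec : Claim_equal_contains_hallucination := by
  intro text _
  unfold Spec_contains_hallucination
  rw [Bool.eq_iff_iff]
  rw [contains_hallucination_alt, chScan_iff]
  simp only [contains_hallucination, List.any_eq_true, PySem.Str.isIn_iff_infix, chPhrases,
    List.mem_cons, List.not_mem_nil, or_false]
  constructor
  · rintro ⟨p, hp, hinf⟩
    exact ⟨p.toList, by rcases hp with h|h|h|h|h|h <;> subst h <;> simp, hinf⟩
  · rintro ⟨p, hp, hinf⟩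
    rcases hp with h|h|h|h|h|h <;> subst h <;>
      exact ⟨_, by simp, hinf⟩
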